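-- pv_equiv track=rewrite | github.com/yanghailin007-dotcom/xsdm | fix_remaining_imports.py | get_docstring_and_imports_end
-- ===== SOURCE A (Python) =====
-- def get_docstring_and_imports_end(content):
--     """找到文档字符串和第一个真实导入语句的位置"""
--     lines = content.split('\n')
--     insert_position = 0
--     in_docstring = False
--     docstring_char = None
--
--     for i, line in enumerate(lines):
--         stripped = line.strip()
--
--         # 检查文档字符串
--         if (stripped.startswith('"""') or stripped.startswith("'''")):
--             if not in_docstring:
--                 docstring_char = '"""' if stripped.startswith('"""') else "'''"
--                 in_docstring = True
--                 if docstring_char in stripped[3:]: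
--                     in_docstring = False
--             else:
--                 in_docstring = False
--
--         # 如果不在文档字符串中，检查导入
--         if not in_docstring and stripped and not stripped.startswith('#'):
--             if stripped.startswith(('import ', 'from ')):
--                 insert_position = i
--                 break
--
--     # 如果找到导入，就在导入之前插入
--     if insert_position > 0:
--         # 插入在导入前，且要保留之前的空行和注释
--         while insert_position > 0 and (not lines[insert_position - 1].strip() or lines[insert_position - 1].strip().startswith('#')):
--             insert_position -= 1
--
--     return insert_position
-- ===== SOURCE B (Python) =====
-- def get_docstring_and_imports_end(content):
--     # Single forward pass carrying the insertion anchor: no break-then-backtrack.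
--     # anchor = index just after the last non-blank, non-comment line seen so far,
--     # i.e. exactly where A's backward walk over blanks/comments would stop.
--     anchor = 0
--     in_doc = False
--     for i, line in enumerate(content.split('\n')):
--         s = line.strip()
--         if s.startswith('"""') or s.startswith("'''"):
--             if not in_doc:
--                 q = '"""' if s.startswith('"""') else "'''"
--                 in_doc = q not in s[3:]
--             else:
--                 in_doc = False
--         if s and not s.startswith('#'):
--             if not in_doc and (s.startswith('import ') or s.startswith('from ')):
--                 return anchor
--             anchor = i + 1
--     return 0
-- ===== Notes on version B (the rewrite author's own statement) =====
-- stated objective: alternative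
-- what changed: A breaks at the first import and then walks BACKWARD over blank/comment lines with a position>0 guard; B never backtracks: one forward pass carries an anchor accumulator (the index just after the last substantial line) and returns it at the first import, eliminating the second loop and the guard.
import Mathlib
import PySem

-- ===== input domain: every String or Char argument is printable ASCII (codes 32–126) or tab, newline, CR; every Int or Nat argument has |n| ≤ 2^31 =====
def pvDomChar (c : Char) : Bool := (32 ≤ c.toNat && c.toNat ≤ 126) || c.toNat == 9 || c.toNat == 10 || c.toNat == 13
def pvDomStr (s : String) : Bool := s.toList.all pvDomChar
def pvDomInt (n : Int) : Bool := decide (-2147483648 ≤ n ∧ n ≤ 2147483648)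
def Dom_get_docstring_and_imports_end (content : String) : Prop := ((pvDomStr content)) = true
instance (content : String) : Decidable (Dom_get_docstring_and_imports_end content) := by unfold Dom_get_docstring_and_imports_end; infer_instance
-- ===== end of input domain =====

-- B replaces A's break-then-backward-walk with ONE forward pass carrying an insertion anchor; objective: alternative decomposition, same cost.

-- ===== PORT A =====
-- A's fused enumerate-loop: carries the docstring state, returns the absolute index of the
-- first real import (0 if none), exactly as the Python loop with 'break' does
def pvAFind : List String → Nat → Bool → Nat
  | [], _, _ => 0
  | line :: rest, i, inDoc =>
    let stripped := PySem.Str.strip line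
    let inDoc' :=
      if PySem.Str.startswith stripped "\"\"\"" || PySem.Str.startswith stripped "'''" then
        if !inDoc then
          let dchar := if PySem.Str.startswith stripped "\"\"\"" then "\"\"\"" else "'''"
          if PySem.Str.isIn dchar (PySem.Str.slice stripped (some 3) none) then false else true
        else false
      else inDoc
    if !inDoc' && (PySem.Str.len stripped != 0) && !PySem.Str.startswith stripped "#" then
      if PySem.Str.startswith stripped "import " || PySem.Str.startswith stripped "from " then i
      else pvAFind rest (i + 1) inDoc'
    else pvAFind rest (i + 1) inDoc'

-- A's trailing while-loop (lines[p-1] is always in range, so getD's default is never used)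
def pvABack (lines : List String) : Nat → Nat
  | 0 => 0
  | p + 1 =>
    let s := PySem.Str.strip (lines.getD p "")
    if (PySem.Str.len s == 0) || PySem.Str.startswith s "#" then pvABack lines p
    else p + 1

def get_docstring_and_imports_end (content : String) : Int :=
  let lines := (PySem.Str.split? content "\n").getD []
  let pos := pvAFind lines 0 false
  if pos > 0 then (pvABack lines pos : Int) else (pos : Int)

-- ===== PORT B =====
-- Source B's triple-quote state update for one stripped line
def pvDocState (s : String) (state : Bool) : Bool :=
  if PySem.Str.startswith s "\"\"\"" || PySem.Str.startswith s "'''" then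
    if !state then
      let q := if PySem.Str.startswith s "\"\"\"" then "\"\"\"" else "'''"
      !PySem.Str.isIn q (PySem.Str.slice s (some 3) none)
    else false
  else state

-- Source B's single loop: 'anchor' is the index just after the last substantial
-- (non-blank, non-comment) line; returned at the first real import, 0 if the loop finishes
def pvBLoop : List String → Nat → Bool → Nat → Nat
  | [], _, _, _ => 0
  | line :: rest, i, inDoc, anchor =>
    let s := PySem.Str.strip line
    let inDoc' := pvDocState s inDoc
    if (PySem.Str.len s != 0) && !PySem.Str.startswith s "#" then
      if !inDoc' && (PySem.Str.startswith s "import " || PySem.Str.startswith s "from ") then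
        anchor
      else pvBLoop rest (i + 1) inDoc' (i + 1)
    else pvBLoop rest (i + 1) inDoc' anchor

def get_docstring_and_imports_end_alt (content : String) : Int :=
  let lines := (PySem.Str.split? content "\n").getD []
  (pvBLoop lines 0 false 0 : Int)

-- ===== PRECONDITION & SPEC =====
def Spec_get_docstring_and_imports_end (content : String) (out : Int) : Prop := out = get_docstring_and_imports_end_alt content
instance (content : String) (out : Int) : Decidable (Spec_get_docstring_and_imports_end content out) := by unfold Spec_get_docstring_and_imports_end; infer_instance

-- ===== CLAIM (what is proved, stated in full; the proofs are below) =====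
def Claim_equal_get_docstring_and_imports_end : Prop := ∀ (content : String), Dom_get_docstring_and_imports_end content → Spec_get_docstring_and_imports_end content (get_docstring_and_imports_end content)

-- ===== LEMMAS AND PROOFS =====

lemma pv_if_not (m : Bool) : (if m = true then false else true) = !m := by
  cases m <;> rfl

-- A's inline docstring-state update equals B's helper pvDocState
lemma stateA (s : String) (st : Bool) :
    (if PySem.Str.startswith s "\"\"\"" || PySem.Str.startswith s "'''" then
       if !st then
         (if PySem.Str.isIn (if PySem.Str.startswith s "\"\"\"" then "\"\"\"" else "'''")
              (PySem.Str.slice s (some 3) none) then false else true)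
       else false
     else st) = pvDocState s st := by
  rw [pv_if_not]
  rfl

-- main invariant: over any suffix of 'all' starting at k, B's anchor pvABack all k is
-- exactly where A's backward walk from A's break index would stop
lemma loop_eq (all : List String) :
    ∀ (l : List String) (k : Nat) (st : Bool), all.drop k = l →
      pvABack all (pvAFind l k st) = pvBLoop l k st (pvABack all k) := by
  intro l
  induction l with
  | nil => intro k st _; rfl
  | cons line rest ih =>
    intro k st hdrop
    have hget : all[k]? = some line := by
      have h1 : (all.drop k).head? = some line := by rw [hdrop]; rfl
      rwa [List.head?_drop] at h1
    have hrest : all.drop (k + 1) = rest := by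
      have h1 : (all.drop k).tail = rest := by rw [hdrop]; rfl
      rwa [List.tail_drop] at h1
    have hback : pvABack all (k + 1) =
        (if ((PySem.Str.len (PySem.Str.strip line) == 0)
             || PySem.Str.startswith (PySem.Str.strip line) "#") = true
         then pvABack all k else k + 1) := by
      simp only [pvABack, List.getD, hget, Option.getD_some]
    have ihs := ih (k + 1) (pvDocState (PySem.Str.strip line) st) hrest
    rw [hback] at ihs
    simp only [pvAFind, pvBLoop, stateA, bne]
    generalize PySem.Str.strip line = s at ihs ⊢
    generalize pvDocState s st = d at ihs ⊢
    cases d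
    all_goals
      first
      | (try simp at ihs
         try simp
         rcases Bool.eq_false_or_eq_true (PySem.Chars.startswith s.toList ['#']) with hh | hh <;>
           rcases Bool.eq_false_or_eq_true
               (PySem.Chars.startswith s.toList ['i', 'm', 'p', 'o', 'r', 't', ' ']) with h1 | h1 <;>
             rcases Bool.eq_false_or_eq_true
                 (PySem.Chars.startswith s.toList ['f', 'r', 'o', 'm', ' ']) with h2 | h2 <;>
               by_cases he : s = "" <;>
                 simp [hh, h1, h2, he, ihs])

-- lift loop_eq through the final if/cast wrapper of both ports
lemma top_eq (L : List String) :
    (if pvAFind L 0 false > 0 then ((pvABack L (pvAFind L 0 false) : Nat) : Int)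
     else ((pvAFind L 0 false : Nat) : Int)) = ((pvBLoop L 0 false 0 : Nat) : Int) := by
  have h := loop_eq L L 0 false (by simp)
  have h0 : pvABack L 0 = 0 := rfl
  rw [h0] at h
  split_ifs with hp
  · rw [h]
  · have hz : pvAFind L 0 false = 0 := by omega
    rw [hz] at h
    rw [hz, ← h, h0]

-- ===== VERDICT (by name: the statement is the Claim_ definition above) =====
theorem get_docstring_and_imports_end_spec : Claim_equal_get_docstring_and_imports_end := by
  intro content _
  unfold Spec_get_docstring_and_imports_end
  exact top_eq ((PySem.Str.split? content "\n").getD [])
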